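-- pv_equiv track=rewrite | github.com/SaranSundar/SearchEngineBackend | search_engine.py | contains_words
-- ===== SOURCE A (Python) =====
-- def contains_words(index_string, words, case_sensitive):
--     """
--     Determines if the given index_string contains all tokens within words.
--     :param index_string: The string within which to search for tokens
--     :param words: The list of tokens to find in the index_string
--     :param case_sensitive: True if differences in case matter, False otherwise
--     :return: True if all words are found in the index_string, False otherwise
--     """
--
--     # Base case
--     if len(words) == 0:
--         return True
--
--     # Remove duplicates, hash contents
--     words = set(words)
--     # Case sensitivity
--     if case_sensitive:
--         index_string = index_string.lower()
--
--     # Iterate through index_string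
--     for token in index_string.split(' '):
--         # Case sensitivity
--         if case_sensitive:
--             token = token.lower()
--         # Check this is one of the words
--         if token in words:
--             # Stop checking for that word
--             words.remove(token)
--             # All words found? Return True
--             if len(words) == 0:
--                 return True
--
--     return False
-- ===== SOURCE B (Python) =====
-- def contains_words(index_string, words, case_sensitive):
--     """Idiomatic rewrite: build the full token list once (lowercasing the
--     index_string when case_sensitive is truthy, exactly as A does) and answer
--     with a single subset test instead of A's streaming remove/early-exit loop."""
--     if case_sensitive:
--         index_string = index_string.lower()
--     return set(words).issubset(index_string.split(' '))
-- ===== Notes on version B (the rewrite author's own statement) =====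
-- stated objective: idiomatic
-- what changed: Replaces A's streaming loop that mutates a shrinking word set with early exit by building the token list once and answering with a single set(words).issubset(tokens) test (empty words handled implicitly).
import Mathlib
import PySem

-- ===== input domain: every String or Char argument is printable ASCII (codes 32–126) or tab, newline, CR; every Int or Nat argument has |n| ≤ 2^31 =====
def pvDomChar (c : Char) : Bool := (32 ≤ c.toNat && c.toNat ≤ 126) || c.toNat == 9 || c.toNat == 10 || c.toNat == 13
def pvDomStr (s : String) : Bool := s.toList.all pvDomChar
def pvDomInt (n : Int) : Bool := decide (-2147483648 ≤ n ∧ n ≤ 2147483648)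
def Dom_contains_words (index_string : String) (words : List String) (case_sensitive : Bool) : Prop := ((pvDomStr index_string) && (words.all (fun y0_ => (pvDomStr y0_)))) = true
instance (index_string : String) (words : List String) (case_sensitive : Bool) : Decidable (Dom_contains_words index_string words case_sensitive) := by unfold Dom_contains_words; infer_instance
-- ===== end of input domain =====

-- B replaces A's streaming remove/early-exit loop over a shrinking word set with one subset test
-- against the token list built once; same case handling, so the return value is identical (proved below).

-- ===== PORT A =====
-- A's 'for token in index_string.split(' ')' loop with the shrinking word set and early exit.
-- 'words.remove(token)' is guarded by 'token in words', so Set.discard is exactly Python's remove here.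
def cwLoop (cs : Bool) : List String → PySem.Set String → Bool
  | [], _ => false
  | token :: rest, ws =>
    let token' := if cs then PySem.Str.lower token else token
    if PySem.Set.contains ws token' then
      let ws' := PySem.Set.discard ws token'
      if PySem.Set.len ws' == 0 then true
      else cwLoop cs rest ws'
    else cwLoop cs rest ws

def contains_words (index_string : String) (words : List String) (case_sensitive : Bool) : Bool :=
  if words.length == 0 then true
  else
    let ws := PySem.Set.ofList words
    let istr := if case_sensitive then PySem.Str.lower index_string else index_string
    cwLoop case_sensitive ((PySem.Str.split? istr " ").getD []) ws

-- ===== PORT B =====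
def contains_words_alt (index_string : String) (words : List String) (case_sensitive : Bool) : Bool :=
  let istr := if case_sensitive then PySem.Str.lower index_string else index_string
  PySem.Set.issubset (PySem.Set.ofList words) ((PySem.Str.split? istr " ").getD [])

-- ===== PRECONDITION & SPEC =====
def Spec_contains_words (index_string : String) (words : List String) (case_sensitive : Bool) (out : Bool) : Prop := out = contains_words_alt index_string words case_sensitive
instance (index_string : String) (words : List String) (case_sensitive : Bool) (out : Bool) : Decidable (Spec_contains_words index_string words case_sensitive out) := by unfold Spec_contains_words; infer_instance

-- ===== CLAIM (what is proved, stated in full; the proofs are below) =====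
def Claim_equal_contains_words : Prop := ∀ (index_string : String) (words : List String) (case_sensitive : Bool), Dom_contains_words index_string words case_sensitive → Spec_contains_words index_string words case_sensitive (contains_words index_string words case_sensitive)

-- ===== LEMMAS AND PROOFS =====

lemma isupper_ofNat_add32 (c : Char) (h : PySem.Chars.isupper c = true) :
    PySem.Chars.isupper (Char.ofNat (c.toNat + 32)) = false := by
  simp only [PySem.Chars.isupper, Bool.and_eq_true, decide_eq_true_eq] at h
  obtain ⟨h1, h2⟩ := h
  have hA : (65 : Nat) ≤ c.toNat := by
    simpa [Char.le_def, UInt32.le_iff_toNat_le] using h1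
  have hZ : c.toNat ≤ 90 := by
    simpa [Char.le_def, UInt32.le_iff_toNat_le] using h2
  have hv : (c.toNat + 32).isValidChar := Or.inl (by omega)
  have ht : (Char.ofNat (c.toNat + 32)).toNat = c.toNat + 32 := by
    rw [Char.toNat_ofNat, if_pos hv]
  simp only [PySem.Chars.isupper, Bool.and_eq_false_iff, decide_eq_false_iff_not]
  right
  intro hle
  have : (90 : Nat) < (Char.ofNat (c.toNat + 32)).toNat := by omega
  have h90 : ('Z' : Char).toNat = 90 := by decide
  have := (by simpa [Char.le_def, UInt32.le_iff_toNat_le] using hle : (Char.ofNat (c.toNat + 32)).toNat ≤ 90)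
  omega

lemma lowerChar_idem (c : Char) :
    PySem.Chars.lowerChar (PySem.Chars.lowerChar c) = PySem.Chars.lowerChar c := by
  unfold PySem.Chars.lowerChar
  by_cases h : PySem.Chars.isupper c = true
  · simp [h, isupper_ofNat_add32 c h]
  · simp [h]

-- every character of a token produced by splitOn comes from the input (or the accumulators)
lemma splitOn_go_chars (sep : List Char) (fuel : Nat) :
    ∀ (l cur : List Char) (acc : List (List Char)),
      ∀ tok ∈ PySem.Chars.splitOn.go sep fuel l cur acc,
        ∀ c ∈ tok, c ∈ l ∨ c ∈ cur ∨ ∃ t ∈ acc, c ∈ t := by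
  induction fuel with
  | zero =>
    intro l cur acc tok htok c hc
    simp only [PySem.Chars.splitOn.go, List.mem_reverse, List.mem_cons] at htok
    rcases htok with h | h
    · subst h
      simp only [List.mem_append, List.mem_reverse] at hc
      tauto
    · exact Or.inr (Or.inr ⟨tok, h, hc⟩)
  | succ fuel ih =>
    intro l cur acc tok htok c hc
    cases l with
    | nil =>
      simp only [PySem.Chars.splitOn.go, List.mem_reverse, List.mem_cons] at htok
      rcases htok with h | h
      · subst h
        simp only [List.mem_reverse] at hc
        tauto
      · exact Or.inr (Or.inr ⟨tok, h, hc⟩)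
    | cons ch rest =>
      rw [PySem.Chars.splitOn.go] at htok
      by_cases hp : sep.isPrefixOf (ch :: rest) = true
      · rw [if_pos hp] at htok
        rcases ih _ _ _ tok htok c hc with h | h | ⟨t, ht, hct⟩
        · exact Or.inl (List.mem_of_mem_drop h)
        · simp at h
        · rcases (List.mem_cons.mp ht) with h | h
          · subst h
            simp only [List.mem_reverse] at hct
            tauto
          · exact Or.inr (Or.inr ⟨t, h, hct⟩)
      · rw [if_neg hp] at htok
        rcases ih _ _ _ tok htok c hc with h | h | ⟨t, ht, hct⟩
        · exact Or.inl (List.mem_cons_of_mem _ h)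
        · rcases List.mem_cons.mp h with h | h
          · exact Or.inl (List.mem_cons.mpr (Or.inl h))
          · tauto
        · exact Or.inr (Or.inr ⟨t, ht, hct⟩)

lemma splitOn_chars (l sep : List Char) :
    ∀ tok ∈ PySem.Chars.splitOn l sep, ∀ c ∈ tok, c ∈ l := by
  intro tok htok c hc
  rw [PySem.Chars.splitOn] at htok
  rcases splitOn_go_chars sep (l.length + 1) l [] [] tok htok c hc with h | h | ⟨t, ht, _⟩
  · exact h
  · simp at h
  · simp at ht

-- a token of a lowered string is fixed by lower
lemma lower_fix_of_mem_split_lower (s : String) (t : String)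
    (ht : t ∈ (PySem.Str.split? (PySem.Str.lower s) " ").getD []) :
    PySem.Str.lower t = t := by
  have hsep : (" " : String).toList = [' '] := rfl
  have hsplit : PySem.Str.split? (PySem.Str.lower s) " "
      = some (((PySem.Chars.splitOn (PySem.Chars.lower s.toList) [' '])).map String.ofList) := by
    rw [PySem.Str.split?]
    have h1 : (PySem.Str.lower s).toList = PySem.Chars.lower s.toList := PySem.Str.toList_lower s
    rw [h1]
    have h2 : (" " : String).toList = [' '] := rfl
    rw [h2, PySem.Chars.split?]
    rfl
  rw [hsplit] at ht
  simp only [Option.getD_some, List.mem_map] at ht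
  obtain ⟨tok, htok, rfl⟩ := ht
  have hfix : ∀ c ∈ tok, PySem.Chars.lowerChar c = c := by
    intro c hc
    have hcl : c ∈ PySem.Chars.lower s.toList := splitOn_chars _ _ tok htok c hc
    simp only [PySem.Chars.lower, List.mem_map] at hcl
    obtain ⟨d, _, rfl⟩ := hcl
    exact lowerChar_idem d
  apply String.toList_inj.mp
  rw [PySem.Str.toList_lower, String.toList_ofList]
  calc PySem.Chars.lower tok = tok.map id := List.map_congr_left hfix
    _ = tok := List.map_id tok

-- characterization of A's loop: for a nonempty Nodup word set it is exactly the subset test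
lemma cwLoop_eq_subset (cs : Bool) (ts : List String) :
    ∀ ws : PySem.Set String, ws.Nodup → ws ≠ [] →
      (cwLoop cs ts ws = true ↔
        ∀ w ∈ ws, w ∈ ts.map (fun t => if cs then PySem.Str.lower t else t)) := by
  induction ts with
  | nil =>
    intro ws hnd hne
    simp only [cwLoop, List.map_nil]
    constructor
    · intro h; exact absurd h (by simp)
    · intro h
      cases ws with
      | nil => exact absurd rfl hne
      | cons w ws' => exact absurd (h w (by simp)) (by simp)
  | cons t rest ih =>
    intro ws hnd hne
    simp only [cwLoop, List.map_cons]
    set t' := if cs then PySem.Str.lower t else t with ht'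
    by_cases hmem : PySem.Set.contains ws t' = true
    · rw [if_pos hmem]
      have hmem' : t' ∈ ws := (PySem.Set.contains_iff ws t').mp hmem
      by_cases hempty : PySem.Set.len (PySem.Set.discard ws t') == 0
      · rw [if_pos hempty]
        have hnil : PySem.Set.discard ws t' = [] := by
          have hlen : (PySem.Set.discard ws t').length = 0 := by
            simpa [PySem.Set.len] using hempty
          exact List.eq_nil_of_length_eq_zero hlen
        have hall : ∀ w ∈ ws, w = t' := by
          intro w hw
          by_contra hne'
          have : w ∈ PySem.Set.discard ws t' := (PySem.Set.mem_discard ws t' w).mpr ⟨hw, hne'⟩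
          rw [hnil] at this
          simp at this
        constructor
        · intro _ w hw
          rw [hall w hw]; exact List.mem_cons_self
        · intro _; rfl
      · rw [if_neg hempty]
        have hnil' : PySem.Set.discard ws t' ≠ [] := by
          intro h
          apply hempty
          rw [h]; simp [PySem.Set.len]
        rw [ih (PySem.Set.discard ws t') (PySem.Set.nodup_discard ws t' hnd) hnil']
        constructor
        · intro h w hw
          by_cases hwt : w = t'
          · subst hwt; exact List.mem_cons_self
          · exact List.mem_cons_of_mem _ (h w ((PySem.Set.mem_discard ws t' w).mpr ⟨hw, hwt⟩))
        · intro h w hw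
          obtain ⟨hw1, hw2⟩ := (PySem.Set.mem_discard ws t' w).mp hw
          rcases List.mem_cons.mp (h w hw1) with h' | h'
          · exact absurd h' hw2
          · exact h'
    · rw [if_neg hmem]
      have hnmem : t' ∉ ws := fun h => hmem ((PySem.Set.contains_iff ws t').mpr h)
      rw [ih ws hnd hne]
      constructor
      · intro h w hw; exact List.mem_cons_of_mem _ (h w hw)
      · intro h w hw
        rcases List.mem_cons.mp (h w hw) with h' | h'
        · subst h'; exact absurd hw hnmem
        · exact h'

-- ===== VERDICT (by name: the statement is the Claim_ definition above) =====
theorem contains_words_spec : Claim_equal_contains_words := by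
  intro index_string words case_sensitive _
  unfold Spec_contains_words contains_words contains_words_alt
  by_cases hw : words.length == 0
  · rw [if_pos hw]
    have hnil : words = [] := by
      cases words with
      | nil => rfl
      | cons a l => simp at hw
    subst hnil
    rfl
  · rw [if_neg hw]
    have hwne : words ≠ [] := fun h => by subst h; simp at hw
    have hofne : PySem.Set.ofList words ≠ [] := by
      cases words with
      | nil => exact absurd rfl hwne
      | cons a l => simp [PySem.Set.ofList_cons]
    cases case_sensitive with
    | false =>
      show cwLoop false ((PySem.Str.split? index_string " ").getD []) (PySem.Set.ofList words)
          = PySem.Set.issubset (PySem.Set.ofList words) ((PySem.Str.split? index_string " ").getD [])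
      rw [Bool.eq_iff_iff,
        cwLoop_eq_subset false _ (PySem.Set.ofList words) (PySem.Set.nodup_ofList words) hofne,
        PySem.Set.issubset_iff]
      simp
    | true =>
      show cwLoop true ((PySem.Str.split? (PySem.Str.lower index_string) " ").getD [])
            (PySem.Set.ofList words)
          = PySem.Set.issubset (PySem.Set.ofList words)
            ((PySem.Str.split? (PySem.Str.lower index_string) " ").getD [])
      rw [Bool.eq_iff_iff,
        cwLoop_eq_subset true _ (PySem.Set.ofList words) (PySem.Set.nodup_ofList words) hofne,
        PySem.Set.issubset_iff]
      have hmap : ((PySem.Str.split? (PySem.Str.lower index_string) " ").getD []).map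
          (fun t => if (true : Bool) then PySem.Str.lower t else t)
          = (PySem.Str.split? (PySem.Str.lower index_string) " ").getD [] := by
        refine (List.map_congr_left ?_).trans (List.map_id _)
        intro t ht
        show PySem.Str.lower t = t
        exact lower_fix_of_mem_split_lower index_string t ht
      rw [hmap]
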